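-- pv_equiv track=rewrite | github.com/cesperon/Sonoma-State-CS | cs115-Programming I/Project 3/project3.py | deal_initial_hands
-- ===== SOURCE A (Python) =====
-- rackSize = 3 #3, 4, 10
--
-- def get_top_card(list):
--     """
--     Gets the top card from any any given deck.
--
--     Parameter: deck
--     Returns: top card from deck
--     """
--     top_card=list.pop()
--     return top_card
--
-- def deal_initial_hands(deck):
--     """
--     Deals out two hands of cards.
--
--     Parameter: List(deck)
--     Returns: Two lists which represent to card hands
--     """
--
--     hand1=[]
--     hand2=[]
--     top_card_user = get_top_card(deck)
--     hand1.append(top_card_user)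
--     top_card_user2=get_top_card(deck)
--     hand2.append(top_card_user2)
--
--     while (len(hand1)) < rackSize and (len(hand2)) < rackSize :
--
--         top_card_user = get_top_card(deck)
--         hand1.append(top_card_user)
--         top_card_user2= get_top_card(deck)
--         hand2.append(top_card_user2)
--
--
--     return hand1,hand2
-- ===== SOURCE B (Python) =====
-- rackSize = 3
--
-- def deal_initial_hands(deck):
--     """Deal two hands: collect all cards in one pass, then split by parity.
--
--     Same pop order and in-place mutation of deck as the original; raises
--     IndexError at the same point on a short deck.
--     """
--     cards = [deck.pop() for _ in range(2 * rackSize)]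
--     hand1 = cards[0::2]
--     hand2 = cards[1::2]
--     return hand1, hand2
-- ===== Notes on version B (the rewrite author's own statement) =====
-- stated objective: simpler
-- what changed: Replaces the two-pops-then-while-loop-with-length-tests structure by a single collect pass of 2*rackSize pops followed by an index-parity split into the two hands.
import Mathlib
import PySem

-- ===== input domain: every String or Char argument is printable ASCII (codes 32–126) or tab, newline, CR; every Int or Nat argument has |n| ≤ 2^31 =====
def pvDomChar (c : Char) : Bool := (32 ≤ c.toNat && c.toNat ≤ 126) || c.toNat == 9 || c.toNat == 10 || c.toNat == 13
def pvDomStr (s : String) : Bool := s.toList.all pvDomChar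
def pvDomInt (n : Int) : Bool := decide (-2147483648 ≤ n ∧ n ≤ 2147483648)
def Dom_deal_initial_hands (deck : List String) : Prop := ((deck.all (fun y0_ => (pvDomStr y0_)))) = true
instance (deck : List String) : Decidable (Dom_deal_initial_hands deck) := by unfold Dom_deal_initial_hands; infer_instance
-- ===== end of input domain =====

-- B replaces A's two-pops-then-while-loop structure by one collect pass of 2*rackSize pops
-- followed by an index-parity split; objective: simpler. Both A and B mutate `deck` in place
-- (pop 6 cards off the end); the equivalence proved here is about the return value.

-- ===== PORT A =====
def pvRackSize : Int := 3

-- get_top_card: list.pop() (none = IndexError on empty deck)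
def pvGetTopCard (xs : List String) : Option (String × List String) := PySem.List.pop? xs

-- the while loop: len(hand1) < rackSize and len(hand2) < rackSize
def pvDealLoop (deck hand1 hand2 : List String) : List String × List String :=
  if _h : (hand1.length : Int) < pvRackSize ∧ (hand2.length : Int) < pvRackSize then
    match pvGetTopCard deck with
    | none => (hand1, hand2)  -- IndexError: outside Pre_
    | some (c1, d1) =>
      match pvGetTopCard d1 with
      | none => (hand1 ++ [c1], hand2)  -- IndexError: outside Pre_
      | some (c2, d2) => pvDealLoop d2 (hand1 ++ [c1]) (hand2 ++ [c2])
  else (hand1, hand2)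
termination_by (pvRackSize - hand1.length).toNat
decreasing_by
  simp only [pvRackSize, List.length_append, List.length_cons, List.length_nil] at *
  omega

def deal_initial_hands (deck : List String) : List String × List String :=
  match pvGetTopCard deck with
  | none => ([], [])  -- IndexError: outside Pre_
  | some (c1, d1) =>
    match pvGetTopCard d1 with
    | none => ([c1], [])  -- IndexError: outside Pre_
    | some (c2, d2) => pvDealLoop d2 [c1] [c2]

-- ===== PORT B =====
-- cards = [deck.pop() for _ in range(2*rackSize)]  (none = IndexError)
def pvCollect (deck : List String) : Nat -> Option (List String)
  | 0 => some []
  | n + 1 =>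
    match PySem.List.pop? deck with
    | none => none
    | some (c, d) => (pvCollect d n).map (fun cs => c :: cs)

def deal_initial_hands_alt (deck : List String) : List String × List String :=
  match pvCollect deck 6 with
  | none => ([], [])  -- IndexError: outside Pre_
  | some cards =>
    ((PySem.List.slice? cards none none 2).getD [],      -- cards[0::2]
     (PySem.List.slice? cards (some 1) none 2).getD [])  -- cards[1::2]

-- ===== PRECONDITION & SPEC =====
-- A raises IndexError (pop from empty list) exactly when the deck has fewer than 2*rackSize = 6 cards.
def Pre_deal_initial_hands (deck : List String) : Prop := 6 ≤ deck.length
instance (deck : List String) : Decidable (Pre_deal_initial_hands deck) := by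
  unfold Pre_deal_initial_hands; infer_instance

def pvWitness_deal_initial_hands : List String := ["a", "b", "c", "d", "e", "f"]

def Spec_deal_initial_hands (deck : List String) (out : List String × List String) : Prop := out = deal_initial_hands_alt deck
instance (deck : List String) (out : List String × List String) : Decidable (Spec_deal_initial_hands deck out) := by unfold Spec_deal_initial_hands; infer_instance

-- ===== CLAIM (what is proved, stated in full; the proofs are below) =====
def Claim_equal_deal_initial_hands : Prop := ∀ (deck : List String), Dom_deal_initial_hands deck → Pre_deal_initial_hands deck → Spec_deal_initial_hands deck (deal_initial_hands deck)

-- ===== LEMMAS AND PROOFS =====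

-- any deck of length ≥ 6 is some prefix followed by its last six cards
lemma pv_split6 (deck : List String) (h : 6 ≤ deck.length) :
    ∃ (t : List String) (x1 x2 x3 x4 x5 x6 : String),
      deck = t ++ [x6, x5, x4, x3, x2, x1] := by
  match hr : deck.reverse with
  | [] | [_] | [_, _] | [_, _, _] | [_, _, _, _] | [_, _, _, _, _] =>
      have := congrArg List.length hr
      rw [List.length_reverse] at this
      simp only [List.length_cons, List.length_nil] at this; omega
  | x1 :: x2 :: x3 :: x4 :: x5 :: x6 :: t =>
      refine ⟨t.reverse, x1, x2, x3, x4, x5, x6, ?_⟩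
      have : deck.reverse.reverse = (x1 :: x2 :: x3 :: x4 :: x5 :: x6 :: t).reverse := by
        rw [hr]
      simpa using this

-- ===== VERDICT (by name: the statement is the Claim_ definition above) =====
theorem deal_initial_hands_spec : Claim_equal_deal_initial_hands := by
  intro deck _ hpre
  obtain ⟨t, x1, x2, x3, x4, x5, x6, rfl⟩ := pv_split6 deck hpre
  show deal_initial_hands _ = deal_initial_hands_alt _
  have e1 : PySem.List.pop? (t ++ [x6, x5, x4, x3, x2, x1]) = some (x1, t ++ [x6, x5, x4, x3, x2]) := by
    simpa using PySem.List.pop?_last (t ++ [x6, x5, x4, x3, x2]) x1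
  have e2 : PySem.List.pop? (t ++ [x6, x5, x4, x3, x2]) = some (x2, t ++ [x6, x5, x4, x3]) := by
    simpa using PySem.List.pop?_last (t ++ [x6, x5, x4, x3]) x2
  have e3 : PySem.List.pop? (t ++ [x6, x5, x4, x3]) = some (x3, t ++ [x6, x5, x4]) := by
    simpa using PySem.List.pop?_last (t ++ [x6, x5, x4]) x3
  have e4 : PySem.List.pop? (t ++ [x6, x5, x4]) = some (x4, t ++ [x6, x5]) := by
    simpa using PySem.List.pop?_last (t ++ [x6, x5]) x4
  have e5 : PySem.List.pop? (t ++ [x6, x5]) = some (x5, t ++ [x6]) := by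
    simpa using PySem.List.pop?_last (t ++ [x6]) x5
  have e6 : PySem.List.pop? (t ++ [x6]) = some (x6, t) := by
    simpa using PySem.List.pop?_last t x6
  have hA : deal_initial_hands (t ++ [x6, x5, x4, x3, x2, x1]) = ([x1, x3, x5], [x2, x4, x6]) := by
    simp only [deal_initial_hands, pvGetTopCard, e1, e2]
    rw [pvDealLoop.eq_def]
    simp only [pvGetTopCard, e3, e4, pvRackSize, List.length_cons, List.length_nil]
    norm_num
    rw [pvDealLoop.eq_def]
    simp only [pvGetTopCard, e5, e6, pvRackSize, List.length_cons, List.length_nil]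
    norm_num
    rw [pvDealLoop.eq_def]
    simp [pvRackSize]
  have hB : deal_initial_hands_alt (t ++ [x6, x5, x4, x3, x2, x1]) = ([x1, x3, x5], [x2, x4, x6]) := by
    simp [deal_initial_hands_alt, pvCollect, e1, e2, e3, e4, e5, e6,
          PySem.List.slice?, PySem.List.sliceIndices, List.range_succ]
  rw [hA, hB]
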